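-- pv_equiv track=rewrite | github.com/mgreen27/dfir-skills | skills/investigation/scripts/export_spreadsheet_of_doom.py | autofit
-- ===== SOURCE A (Python) =====
-- def autofit(width_values: list[list[str]]) -> list[int]:
--     widths: list[int] = []
--     if not width_values:
--         return widths
--     col_count = max(len(row) for row in width_values)
--     for idx in range(col_count):
--         max_len = 0
--         for row in width_values:
--             value = row[idx] if idx < len(row) else ""
--             if value is None:
--                 value = ""
--             value_len = max(len(part) for part in str(value).splitlines() or [""])
--             max_len = max(max_len, value_len)
--         widths.append(min(max(max_len + 2, 12), 48))
--     return widths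
-- ===== SOURCE B (Python) =====
-- def autofit(width_values: list[list[str]]) -> list[int]:
--     if not width_values:
--         return []
--     col_count = max(len(row) for row in width_values)
--     widths = [0] * col_count
--     for row in width_values:
--         for idx, value in enumerate(row):
--             if value is None:
--                 value = ""
--             n = max(len(part) for part in str(value).splitlines() or [""])
--             widths[idx] = max(widths[idx], n)
--     return [min(max(w + 2, 12), 48) for w in widths]
-- ===== Notes on version B (the rewrite author's own statement) =====
-- stated objective: alternative
-- what changed: Column-major gather with inline clamping (for each column index, rescan every row with a bounds-check branch) is replaced by a row-major scatter into a preallocated widths array (each cell visited exactly once via enumerate) followed by a separate final clamping pass.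
import Mathlib
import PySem

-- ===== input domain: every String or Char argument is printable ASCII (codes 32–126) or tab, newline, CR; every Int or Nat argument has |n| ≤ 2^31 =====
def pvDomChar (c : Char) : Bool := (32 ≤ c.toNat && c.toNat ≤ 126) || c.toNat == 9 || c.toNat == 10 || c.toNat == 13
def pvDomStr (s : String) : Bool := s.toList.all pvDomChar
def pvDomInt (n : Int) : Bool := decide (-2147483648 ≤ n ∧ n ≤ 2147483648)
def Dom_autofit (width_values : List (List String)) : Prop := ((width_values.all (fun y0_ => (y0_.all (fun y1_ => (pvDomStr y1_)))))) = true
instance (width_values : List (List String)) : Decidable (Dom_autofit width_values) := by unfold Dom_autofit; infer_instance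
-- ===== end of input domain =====

-- B replaces A's column-major gather (rescan all rows per column, inline clamp) by a
-- row-major scatter into a preallocated widths list plus a separate final clamping pass.


-- ===== PORT A =====
-- shared helper (the same expression occurs in both Pythons):
--   max(len(part) for part in str(value).splitlines() or [""])
def pvLineMax (s : String) : Int :=
  let parts := PySem.Str.splitlines s
  let parts := if parts = [] then [""] else parts
  (PySem.List.max? (parts.map PySem.Str.len) (fun x => x)).getD 0

def autofit (width_values : List (List String)) : List Int :=
  if width_values = [] then []
  else
    let colCount : Int :=
      (PySem.List.max? (width_values.map (fun row => PySem.List.len row)) (fun x => x)).getD 0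
    (PySem.List.pyRange 0 colCount 1).foldl
      (fun widths idx =>
        let maxLen : Int := width_values.foldl
          (fun maxLen row =>
            let value := if idx < PySem.List.len row then PySem.List.pyGetD row idx "" else ""
            max maxLen (pvLineMax value))
          0
        widths ++ [min (max (maxLen + 2) 12) 48])
      []

-- ===== PORT B =====
def autofit_alt (width_values : List (List String)) : List Int :=
  if width_values = [] then []
  else
    let colCount : Int :=
      (PySem.List.max? (width_values.map (fun row => PySem.List.len row)) (fun x => x)).getD 0
    let widths : List Int := width_values.foldl
      (fun widths row =>
        (PySem.List.enumerate row 0).foldl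
          (fun widths p =>
            -- widths[idx] = max(widths[idx], n); idx is always in range (idx < len(row) ≤ colCount)
            PySem.List.pySetD widths p.1 (max (PySem.List.pyGetD widths p.1 0) (pvLineMax p.2)))
          widths)
      (List.replicate colCount.toNat 0)
    widths.map (fun w => min (max (w + 2) 12) 48)

-- ===== PRECONDITION & SPEC =====
def Spec_autofit (width_values : List (List String)) (out : List Int) : Prop := out = autofit_alt width_values
instance (width_values : List (List String)) (out : List Int) : Decidable (Spec_autofit width_values out) := by unfold Spec_autofit; infer_instance

-- ===== CLAIM (what is proved, stated in full; the proofs are below) =====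
def Claim_equal_autofit : Prop := ∀ (width_values : List (List String)), Dom_autofit width_values → Spec_autofit width_values (autofit width_values)

-- ===== LEMMAS AND PROOFS =====

-- B's update step, named for the proofs (definitionally the lambda in autofit_alt)
def pvStep (widths : List Int) (p : Int × String) : List Int :=
  PySem.List.pySetD widths p.1 (max (PySem.List.pyGetD widths p.1 0) (pvLineMax p.2))

-- the per-column running maximum both programs accumulate
def pvColMax (wv : List (List String)) (start : Int) (i : Nat) : Int :=
  wv.foldl (fun m row => max m (pvLineMax (row.getD i ""))) start

theorem pvLineMax_empty : pvLineMax "" = 0 := by decide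

theorem pv_fold_len (l : List (Int × String)) (ws : List Int) :
    (l.foldl pvStep ws).length = ws.length := by
  induction l generalizing ws with
  | nil => rfl
  | cons p t ih => rw [List.foldl_cons, ih, pvStep, PySem.List.length_pySetD]

theorem pv_inner_getD (row : List String) (s : Nat) (ws : List Int)
    (hlen : s + row.length ≤ ws.length) (k : Nat) :
    ((PySem.List.enumerate row (s : Int)).foldl pvStep ws).getD k 0 =
      if s ≤ k ∧ k < s + row.length then max (ws.getD k 0) (pvLineMax (row.getD (k - s) ""))
      else ws.getD k 0 := by
  induction row generalizing s ws with
  | nil => simp [PySem.List.enumerate_nil]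
  | cons v t ih =>
    rw [PySem.List.enumerate_cons, List.foldl_cons,
        show ((s:Int)) + 1 = ((s+1 : Nat) : Int) from by push_cast; ring]
    have hs : s < ws.length := by simp at hlen; omega
    have hset : pvStep ws ((s : Int), v) = ws.set s (max (ws.getD s 0) (pvLineMax v)) := by
      simp [pvStep, PySem.List.pySetD, PySem.List.pySet?_natCast ws s _ hs]
    rw [hset, ih (s+1) _ (by simp at hlen ⊢; omega)]
    have hgetset : ∀ (j : Nat) (x : Int), (ws.set s x).getD j 0 = if j = s then x else ws.getD j 0 := by
      intro j x
      by_cases hj : j = s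
      · subst hj; simp [List.getD, hs]
      · rw [if_neg hj]
        simp [List.getD, show ¬ s = j from fun h => hj h.symm]
    by_cases hk : k = s
    · subst hk
      rw [if_neg (show ¬ (k + 1 ≤ k ∧ k < k + 1 + t.length) from by omega), hgetset,
          if_pos rfl, if_pos (show k ≤ k ∧ k < k + (v :: t).length from by simp),
          show k - k = 0 from by omega, List.getD_cons_zero]
    · simp only [hgetset, if_neg hk]
      by_cases h1 : s + 1 ≤ k ∧ k < s + 1 + t.length
      · rw [if_pos h1, if_pos (by simp; omega), show k - s = (k - (s+1)) + 1 by omega,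
            List.getD_cons_succ]
      · rw [if_neg h1, if_neg (by simp; omega)]

theorem pv_inner_getD0 (row : List String) (ws : List Int)
    (hlen : row.length ≤ ws.length) (k : Nat) :
    ((PySem.List.enumerate row 0).foldl pvStep ws).getD k 0 =
      if k < row.length then max (ws.getD k 0) (pvLineMax (row.getD k ""))
      else ws.getD k 0 := by
  have h := pv_inner_getD row 0 ws (by omega) k
  rw [show (((0:Nat)) : Int) = 0 from by simp] at h
  simpa using h

theorem pv_scatter_char (wv : List (List String)) (ws : List Int)
    (hb : ∀ row ∈ wv, row.length ≤ ws.length)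
    (hnn : ∀ k : Nat, 0 ≤ ws.getD k 0) :
    wv.foldl (fun widths row => (PySem.List.enumerate row 0).foldl pvStep widths) ws
      = (List.range ws.length).map (fun k => pvColMax wv (ws.getD k 0) k) := by
  induction wv generalizing ws with
  | nil =>
    refine List.ext_getElem (by simp) ?_
    intro i h1 h2
    have h1' : i < ws.length := by simpa using h1
    simp [pvColMax, List.getD, List.getElem?_eq_getElem h1']
  | cons row t ih =>
    rw [List.foldl_cons]
    have hrow : row.length ≤ ws.length := hb row (List.mem_cons_self ..)
    have hlen' : ((PySem.List.enumerate row 0).foldl pvStep ws).length = ws.length :=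
      pv_fold_len _ _
    have hget : ∀ k : Nat, ((PySem.List.enumerate row 0).foldl pvStep ws).getD k 0
        = max (ws.getD k 0) (pvLineMax (row.getD k "")) := by
      intro k
      rw [pv_inner_getD0 row ws hrow k]
      by_cases hk : k < row.length
      · rw [if_pos hk]
      · rw [if_neg hk, show row.getD k "" = "" from List.getD_eq_default _ _ (by omega),
            pvLineMax_empty, max_eq_left (hnn k)]
    rw [ih _ (fun r hr => by rw [hlen']; exact hb r (List.mem_cons_of_mem _ hr))
          (fun k => by rw [hget k]; exact le_trans (hnn k) (le_max_left _ _)),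
        hlen']
    refine List.map_congr_left ?_
    intro k hk
    rw [hget k]
    simp [pvColMax]

theorem pv_getD_replicate (n k : Nat) : (List.replicate n (0:Int)).getD k 0 = 0 := by
  by_cases hk : k < n
  · rw [List.getD_eq_getElem _ _ (by simpa using hk)]; simp
  · rw [List.getD_eq_default _ _ (by simpa using hk)]

-- ===== VERDICT (by name: the statement is the Claim_ definition above) =====
theorem autofit_spec : Claim_equal_autofit := by
  intro wv _
  unfold Spec_autofit autofit autofit_alt
  by_cases h : wv = []
  · simp [h]
  rw [if_neg h, if_neg h]
  simp only []
  obtain ⟨r, t, rfl⟩ := List.exists_cons_of_ne_nil h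
  have hsome : PySem.List.max? ((r :: t).map (fun row => PySem.List.len row)) (fun x => x)
      = some ((t.map (fun row => PySem.List.len row)).foldl max (PySem.List.len r)) := by
    rw [List.map_cons, PySem.List.max?_id_cons]
  set m : Int := (PySem.List.max? ((r :: t).map (fun row => PySem.List.len row)) (fun x => x)).getD 0 with hm
  have hmval : m = (t.map (fun row => PySem.List.len row)).foldl max (PySem.List.len r) := by
    rw [hm, hsome]; rfl
  have hmnn : 0 ≤ m := by
    rw [hmval]
    exact le_trans (show (0:Int) ≤ PySem.List.len r from by
      rw [PySem.List.len_eq]; exact Int.natCast_nonneg _) (PySem.List.le_foldl_max _ _).1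
  have hbound : ∀ row ∈ (r :: t), (row.length : Int) ≤ m := by
    intro row hrow
    have h2 := PySem.List.max?_isMax hsome (PySem.List.len row) (List.mem_map_of_mem hrow)
    simpa [PySem.List.len_eq] using hmval.symm ▸ h2
  have hmC : m = ((m.toNat : Nat) : Int) := by omega
  -- ---- side A: gather per column index ----
  rw [show PySem.List.pyRange 0 m 1 = (List.range m.toNat).map (fun (k : Nat) => (k : Int)) from by
        rw [hmC]; exact PySem.List.pyRange_zero_natCast m.toNat,
      List.foldl_map, PySem.List.foldl_append_singleton_eq_map, List.nil_append]
  -- ---- side B: scatter then clamp ----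
  rw [show (fun (widths : List Int) (p : Int × String) =>
        PySem.List.pySetD widths p.1 (max (PySem.List.pyGetD widths p.1 0) (pvLineMax p.2)))
      = pvStep from rfl]
  rw [pv_scatter_char (r :: t) (List.replicate m.toNat 0)
        (fun row hrow => by
          rw [List.length_replicate]
          have := hbound row hrow; omega)
        (fun k => by rw [pv_getD_replicate]),
      List.length_replicate, List.map_map]
  -- both sides are maps over List.range m.toNat; compare pointwise
  refine List.map_congr_left ?_
  intro k hk
  simp only [Function.comp]
  rw [pv_getD_replicate]
  -- the inner fold of A is pvColMax
  have hfun : (fun (maxLen : Int) (row : List String) =>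
        max maxLen (pvLineMax (if (k : Int) < PySem.List.len row then PySem.List.pyGetD row (k : Int) "" else "")))
      = (fun m row => max m (pvLineMax (row.getD k ""))) := by
    funext m' row
    by_cases hkr : k < row.length
    · rw [if_pos (by simp [PySem.List.len_eq]; exact_mod_cast hkr)]
      simp
    · rw [if_neg (by simp [PySem.List.len_eq]; exact_mod_cast Nat.not_lt.mp hkr),
          show row.getD k "" = "" from List.getD_eq_default _ _ (by omega)]
  rw [hfun]
  rfl
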